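-- pv_equiv track=rewrite | github.com/sxchin-01/CySent | backend/train/benchmark.py | _select_baseline
-- ===== SOURCE A (Python) =====
-- from typing import Any, Dict, List
--
-- def _select_baseline(rows: List[Dict[str, Any]], baseline_ref: str) -> Dict[str, Any] | None:
--     ok_rows = [r for r in rows if r.get("status") == "ok"]
--     if not ok_rows:
--         return None
--
--     if baseline_ref:
--         for row in ok_rows:
--             if row.get("label") == baseline_ref or row.get("run_name") == baseline_ref:
--                 return row
--
--     return ok_rows[0]
-- ===== SOURCE B (Python) =====
-- from typing import Any, Dict, List
--
-- def _select_baseline(rows: List[Dict[str, Any]], baseline_ref: str) -> Dict[str, Any] | None: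
--     def priority(r):
--         if baseline_ref and (r.get("label") == baseline_ref or r.get("run_name") == baseline_ref):
--             return 0
--         return 1
--     scored = [(priority(r), i) for i, r in enumerate(rows) if r.get("status") == "ok"]
--     if not scored:
--         return None
--     _, best_i = min(scored)
--     return rows[best_i]
-- ===== Notes on version B (the rewrite author's own statement) =====
-- stated objective: alternative
-- what changed: Instead of filtering ok rows and scanning the filtered list for a match (falling back to its first element), B scores every ok row with a (priority, index) pair and returns the row at the lexicographically minimal score via min().
import Mathlib
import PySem

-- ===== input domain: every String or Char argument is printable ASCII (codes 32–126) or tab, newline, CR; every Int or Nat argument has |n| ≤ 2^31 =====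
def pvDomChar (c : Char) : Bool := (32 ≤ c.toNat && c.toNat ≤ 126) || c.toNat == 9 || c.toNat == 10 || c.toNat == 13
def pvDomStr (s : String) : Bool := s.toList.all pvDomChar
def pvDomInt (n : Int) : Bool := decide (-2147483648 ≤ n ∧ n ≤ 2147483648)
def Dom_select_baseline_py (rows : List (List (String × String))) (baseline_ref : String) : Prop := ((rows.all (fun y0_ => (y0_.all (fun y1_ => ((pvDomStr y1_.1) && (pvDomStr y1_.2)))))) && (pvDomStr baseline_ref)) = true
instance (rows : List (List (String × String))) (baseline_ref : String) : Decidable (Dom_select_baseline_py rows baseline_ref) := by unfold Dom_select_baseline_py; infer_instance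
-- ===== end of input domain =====

-- B replaces A's filter-then-scan-else-first selection by a score-and-argmin: each ok row gets a
-- (priority, index) score and the row with the lexicographically minimal score is returned (objective: alternative).


-- ===== PORT A =====
-- dict.get(k): first match in the association list (exact for a Python dict ported as an assoc list)
def rowGet (r : List (String × String)) (k : String) : Option String :=
  (r.find? (fun kv => kv.1 == k)).map (fun kv => kv.2)

-- A: filter ok rows; if baseline_ref is truthy scan them for a label/run_name match; else first ok row.
def select_baseline_py (rows : List (List (String × String))) (baseline_ref : String) : Option (List (String × String)) :=
  let ok_rows := rows.filter (fun r => rowGet r "status" == some "ok")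
  if ok_rows.isEmpty then none
  else if baseline_ref ≠ "" then
    match ok_rows.find? (fun r => rowGet r "label" == some baseline_ref || rowGet r "run_name" == some baseline_ref) with
    | some row => some row
    | none => ok_rows.head?
  else ok_rows.head?

-- ===== PORT B =====
-- priority(r): 0 if the (truthy) ref matches label or run_name, else 1
def prioB (br : String) (r : List (String × String)) : Nat :=
  if br ≠ "" ∧ (rowGet r "label" == some br || rowGet r "run_name" == some br) = true then 0 else 1

-- Python tuple comparison (p, i) < (q, j), lexicographic
def pairLt (a b : Nat × Int) : Bool := a.1 < b.1 || (a.1 == b.1 && a.2 < b.2)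

-- B: score every ok row with (priority, index); return rows[i] of the minimal score, None if no ok row.
def select_baseline_py_alt (rows : List (List (String × String))) (baseline_ref : String) : Option (List (String × String)) :=
  let scored := (PySem.List.enumerate rows 0).filterMap
    (fun ir => if rowGet ir.2 "status" == some "ok" then some (prioB baseline_ref ir.2, ir.1) else none)
  match scored with
  | [] => none
  | s :: ss => PySem.List.pyGet? rows (ss.foldl (fun m y => if pairLt y m then y else m) s).2

-- ===== PRECONDITION & SPEC =====
def Spec_select_baseline_py (rows : List (List (String × String))) (baseline_ref : String) (out : Option (List (String × String))) : Prop := out = select_baseline_py_alt rows baseline_ref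
instance (rows : List (List (String × String))) (baseline_ref : String) (out : Option (List (String × String))) : Decidable (Spec_select_baseline_py rows baseline_ref out) := by unfold Spec_select_baseline_py; infer_instance

-- ===== CLAIM (what is proved, stated in full; the proofs are below) =====
def Claim_equal_select_baseline_py : Prop := ∀ (rows : List (List (String × String))) (baseline_ref : String), Dom_select_baseline_py rows baseline_ref → Spec_select_baseline_py rows baseline_ref (select_baseline_py rows baseline_ref)

-- ===== LEMMAS AND PROOFS =====

-- two find? predicates that agree pointwise find the same element
theorem find?_ext {α : Type} (p q : α → Bool) (h : ∀ x, p x = q x) (l : List α) :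
    List.find? p l = List.find? q l := by
  have hpq : p = q := funext h
  rw [hpq]

-- priorities are 0 or 1
theorem prioB_le (br : String) (r : List (String × String)) : prioB br r ≤ 1 := by
  unfold prioB; split <;> omega

-- for a truthy ref, zero priority is exactly a label/run_name match
theorem prioB_eq_zero (br : String) (r : List (String × String)) (hbr : ¬ br = "") :
    ((prioB br r == 0) : Bool) = (rowGet r "label" == some br || rowGet r "run_name" == some br) := by
  unfold prioB
  by_cases hq : (rowGet r "label" == some br || rowGet r "run_name" == some br) = true
  · rw [if_pos ⟨hbr, hq⟩, hq]; rfl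
  · rw [if_neg (fun h => hq h.2)]
    simp at hq
    simp [hq]

-- B's guarded filterMap is map after filter
theorem scored_eq (br : String) : ∀ (l : List (Int × List (String × String))),
    l.filterMap (fun ir => if rowGet ir.2 "status" == some "ok" then some (prioB br ir.2, ir.1) else none)
      = (l.filter (fun ir => rowGet ir.2 "status" == some "ok")).map (fun ir => (prioB br ir.2, ir.1)) := by
  intro l
  induction l with
  | nil => rfl
  | cons x xs ih =>
    by_cases hc : rowGet x.2 "status" = some "ok"
    · simp [List.filterMap_cons, List.filter_cons, hc]
      simpa using ih
    · simp [List.filterMap_cons, List.filter_cons, hc]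
      simpa using ih

-- B's min-fold over scores with strictly increasing indices and priorities ≤ 1
-- returns the first zero-priority score, else the first score.
theorem fold_min (ss : List (Nat × Int)) : ∀ (acc : Nat × Int),
    (∀ y ∈ ss, acc.2 < y.2) → ss.Pairwise (fun a b => a.2 < b.2) →
    (∀ y ∈ ss, y.1 ≤ 1) → acc.1 ≤ 1 →
    ss.foldl (fun m y => if pairLt y m then y else m) acc
      = ((acc :: ss).find? (fun p => p.1 == 0)).getD acc := by
  induction ss with
  | nil =>
    intro acc _ _ _ _
    cases h : (acc.1 == 0) <;> simp [h]
  | cons y ys ih =>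
    intro acc hlt hpw hle1 hacc
    have hy2 : acc.2 < y.2 := hlt y (by simp)
    have hpw' := List.pairwise_cons.mp hpw
    have hys1 : y.1 ≤ 1 := hle1 y (by simp)
    have hle1' : ∀ z ∈ ys, z.1 ≤ 1 := fun z hz => hle1 z (by simp [hz])
    simp only [List.foldl_cons]
    by_cases h0 : acc.1 = 0
    · have hplt : pairLt y acc = false := by
        simp [pairLt, h0]
        omega
      rw [hplt]
      simp only [Bool.false_eq_true, if_false]
      rw [ih acc (fun z hz => lt_trans hy2 (hpw'.1 z hz)) hpw'.2 hle1' hacc]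
      simp [h0]
    · have h1 : acc.1 = 1 := by omega
      by_cases hy0 : y.1 = 0
      · have hplt : pairLt y acc = true := by simp [pairLt, h1, hy0]
        rw [hplt]
        simp only [if_true]
        rw [ih y hpw'.1 hpw'.2 hle1' (by omega)]
        simp [h1, hy0]
      · have hyy : y.1 = 1 := by omega
        have hplt : pairLt y acc = false := by
          simp [pairLt, h1, hyy]
          omega
        rw [hplt]
        simp only [Bool.false_eq_true, if_false]
        rw [ih acc (fun z hz => lt_trans hy2 (hpw'.1 z hz)) hpw'.2 hle1' hacc]
        simp [h1, hyy]

-- find? over an enumerated list, projected to the element, is find? over the list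
theorem find?_enumerate_snd {α : Type} (q : α → Bool) : ∀ (xs : List α) (s : Int),
    ((PySem.List.enumerate xs s).find? (fun ir => q ir.2)).map Prod.snd = xs.find? q := by
  intro xs
  induction xs with
  | nil => intro s; simp [PySem.List.enumerate]
  | cons x xs ih =>
    intro s
    rw [PySem.List.enumerate_cons]
    cases hq : q x <;> simp [hq, ih]

-- a member of enumerate xs 0 is an in-range (index, element) pair
theorem pyGet_enum {α : Type} (xs : List α) (ir : Int × α) (h : ir ∈ PySem.List.enumerate xs 0) :
    PySem.List.pyGet? xs ir.1 = some ir.2 := by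
  obtain ⟨k, hk, rfl⟩ := (PySem.List.mem_enumerate_iff xs 0 ir).mp h
  simp [hk]

theorem main_eq (rows : List (List (String × String))) (br : String) :
    select_baseline_py rows br = select_baseline_py_alt rows br := by
  unfold select_baseline_py select_baseline_py_alt
  simp only [scored_eq br]
  have hsnd : (List.find? (fun ir => rowGet ir.2 "status" == some "ok")
      (PySem.List.enumerate rows 0)).map Prod.snd
      = List.find? (fun r => rowGet r "status" == some "ok") rows :=
    find?_enumerate_snd (fun r => rowGet r "status" == some "ok") rows 0
  cases hfo : List.find? (fun r => rowGet r "status" == some "ok") rows with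
  | none =>
    rw [hfo] at hsnd
    have hBf : List.find? (fun ir => rowGet ir.2 "status" == some "ok")
        (PySem.List.enumerate rows 0) = none := by
      rcases hx : List.find? (fun ir => rowGet ir.2 "status" == some "ok")
          (PySem.List.enumerate rows 0) with _ | ir
      · exact hx
      · rw [hx] at hsnd; simp at hsnd
    have hA : List.filter (fun r => rowGet r "status" == some "ok") rows = [] := by
      rw [← List.head?_eq_none_iff, List.head?_filter, hfo]
    have hB : List.filter (fun ir => rowGet ir.2 "status" == some "ok")
        (PySem.List.enumerate rows 0) = [] := by
      rw [← List.head?_eq_none_iff, List.head?_filter, hBf]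
    rw [hA, hB]
    simp
  | some r0 =>
    rw [hfo] at hsnd
    rcases hx : List.find? (fun ir => rowGet ir.2 "status" == some "ok")
        (PySem.List.enumerate rows 0) with _ | ir0
    · rw [hx] at hsnd; simp at hsnd
    · rw [hx] at hsnd
      have hir02 : ir0.2 = r0 := by simpa using hsnd
      have hmem0 : ir0 ∈ PySem.List.enumerate rows 0 := List.mem_of_find?_eq_some hx
      have hget0 : PySem.List.pyGet? rows ir0.1 = some ir0.2 := pyGet_enum rows ir0 hmem0
      have hBh : (List.filter (fun ir => rowGet ir.2 "status" == some "ok")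
          (PySem.List.enumerate rows 0)).head? = some ir0 := by
        rw [List.head?_filter, hx]
      have hAh : (List.filter (fun r => rowGet r "status" == some "ok") rows).head? = some r0 := by
        rw [List.head?_filter, hfo]
      have hAne : (List.filter (fun r => rowGet r "status" == some "ok") rows).isEmpty = false := by
        rcases hF : List.filter (fun r => rowGet r "status" == some "ok") rows with _ | ⟨a, t⟩
        · rw [hF] at hAh; simp at hAh
        · rfl
      rw [if_neg (by simp [hAne])]
      rcases hsc : (List.filter (fun ir => rowGet ir.2 "status" == some "ok")
          (PySem.List.enumerate rows 0)).map (fun ir => (prioB br ir.2, ir.1)) with _ | ⟨s, ss⟩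
      · exfalso
        have hfe : List.filter (fun ir => rowGet ir.2 "status" == some "ok")
            (PySem.List.enumerate rows 0) = [] := List.map_eq_nil_iff.mp hsc
        rw [hfe] at hBh; simp at hBh
      · rw [hsc]
        dsimp only
        have hhead : s = (prioB br ir0.2, ir0.1) := by
          have h1 : ((List.filter (fun ir => rowGet ir.2 "status" == some "ok")
              (PySem.List.enumerate rows 0)).map (fun ir => (prioB br ir.2, ir.1))).head?
              = some (prioB br ir0.2, ir0.1) := by
            rw [List.head?_map, hBh]; rfl
          rw [hsc] at h1; simpa using h1
        have hpw : (s :: ss).Pairwise (fun a b : Nat × Int => a.2 < b.2) := by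
          rw [← hsc]
          refine List.Pairwise.map _ ?_ (List.Pairwise.filter _ (PySem.List.pairwise_lt_enumerate rows 0))
          intro a b hab
          exact hab
        have hle1 : ∀ y ∈ s :: ss, y.1 ≤ 1 := by
          intro y hy
          rw [← hsc] at hy
          rcases List.mem_map.mp hy with ⟨ir, _, rfl⟩
          exact prioB_le br ir.2
        have hpw' := List.pairwise_cons.mp hpw
        have hfold := fold_min ss s hpw'.1 hpw'.2 (fun y hy => hle1 y (by simp [hy])) (hle1 s (by simp))
        rw [hfold]
        have hfind : (s :: ss).find? (fun p : Nat × Int => p.1 == 0)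
            = ((List.filter (fun ir => rowGet ir.2 "status" == some "ok")
                (PySem.List.enumerate rows 0)).find? (fun ir => prioB br ir.2 == 0)).map
                  (fun ir => (prioB br ir.2, ir.1)) := by
          rw [← hsc, List.find?_map]
          rfl
        rw [hfind]
        by_cases hbr : br = ""
        · subst hbr
          rw [if_neg (by simp)]
          have hzero : ∀ r : List (String × String), prioB "" r = 1 := by
            intro r; simp [prioB]
          have hnone : ((List.filter (fun ir => rowGet ir.2 "status" == some "ok")
              (PySem.List.enumerate rows 0)).find? (fun ir => prioB "" ir.2 == 0)) = none := by
            apply List.find?_eq_none.mpr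
            intro x _
            simp [hzero]
          rw [hnone]
          simp [hAh, hhead, hget0, hir02]
        · rw [if_pos hbr]
          have hAfind : (List.filter (fun r => rowGet r "status" == some "ok") rows).find?
              (fun r => rowGet r "label" == some br || rowGet r "run_name" == some br)
              = List.find? (fun r => (rowGet r "status" == some "ok")
                  && (rowGet r "label" == some br || rowGet r "run_name" == some br)) rows := by
            rw [List.find?_filter]
            refine find?_ext _ _ ?_ rows
            intro r
            cases hc' : (rowGet r "status" == some "ok") <;>
              cases hq' : (rowGet r "label" == some br || rowGet r "run_name" == some br) <;>
                simp [hc', hq']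
          have hBfind : ((List.filter (fun ir => rowGet ir.2 "status" == some "ok")
              (PySem.List.enumerate rows 0)).find? (fun ir => prioB br ir.2 == 0))
              = List.find? (fun ir => (rowGet ir.2 "status" == some "ok")
                  && (rowGet ir.2 "label" == some br || rowGet ir.2 "run_name" == some br))
                  (PySem.List.enumerate rows 0) := by
            rw [List.find?_filter]
            refine find?_ext _ _ ?_ (PySem.List.enumerate rows 0)
            intro ir
            have hz := prioB_eq_zero br ir.2 hbr
            cases hc' : (rowGet ir.2 "status" == some "ok") <;>
              cases hq' : (rowGet ir.2 "label" == some br || rowGet ir.2 "run_name" == some br) <;>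
                simp [hc', hq', hz]
          have hM2 : (List.find? (fun ir => (rowGet ir.2 "status" == some "ok")
              && (rowGet ir.2 "label" == some br || rowGet ir.2 "run_name" == some br))
              (PySem.List.enumerate rows 0)).map Prod.snd
              = List.find? (fun r => (rowGet r "status" == some "ok")
                  && (rowGet r "label" == some br || rowGet r "run_name" == some br)) rows :=
            find?_enumerate_snd (fun r => (rowGet r "status" == some "ok")
              && (rowGet r "label" == some br || rowGet r "run_name" == some br)) rows 0
          rw [hAfind, hBfind]
          cases hM : List.find? (fun ir => (rowGet ir.2 "status" == some "ok")
              && (rowGet ir.2 "label" == some br || rowGet ir.2 "run_name" == some br))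
              (PySem.List.enumerate rows 0) with
          | none =>
            rw [hM] at hM2
            have hMr : List.find? (fun r => (rowGet r "status" == some "ok")
                && (rowGet r "label" == some br || rowGet r "run_name" == some br)) rows = none := by
              simpa using hM2.symm
            rw [hMr]
            simp [hAh, hhead, hget0, hir02]
          | some irm =>
            rw [hM] at hM2
            have hMr : List.find? (fun r => (rowGet r "status" == some "ok")
                && (rowGet r "label" == some br || rowGet r "run_name" == some br)) rows
                = some irm.2 := by
              simpa using hM2.symm
            rw [hMr]
            have hmm : irm ∈ PySem.List.enumerate rows 0 := List.mem_of_find?_eq_some hM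
            have hg : PySem.List.pyGet? rows irm.1 = some irm.2 := pyGet_enum rows irm hmm
            simp [hg]

-- ===== VERDICT =====
theorem select_baseline_py_spec : Claim_equal_select_baseline_py := by
  intro rows br _
  unfold Spec_select_baseline_py
  exact main_eq rows br
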